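-- pv_equiv track=rewrite | github.com/IT-for-Prof/zabbix-webservices | scripts/externalscripts/web_check.py | _hostname_covered
-- ===== SOURCE A (Python) =====
-- def _hostname_covered(host: str, names: list[str]) -> bool:
--     """Wildcard-aware host vs SAN/CN matching."""
--     host = host.lower()
--     for n in names:
--         if not n:
--             continue
--         n = n.lower()
--         if n == host:
--             return True
--         if n.startswith("*."):
--             tail = n[2:]
--             # Wildcard matches only one label level
--             if host.endswith("." + tail) and host.count(".") == tail.count(".") + 1:
--                 return True
--     return False
-- ===== SOURCE B (Python) =====
-- def _hostname_covered(host: str, names: list[str]) -> bool: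
--     """Wildcard-aware host vs SAN/CN matching (index-then-query form)."""
--     host = host.lower()
--     seen = {n.lower() for n in names if n}
--     if host in seen:
--         return True
--     dot = host.find(".")
--     return dot != -1 and ("*." + host[dot + 1:]) in seen
-- ===== Notes on version B (the rewrite author's own statement) =====
-- stated objective: simpler
-- what changed: Replaces A's per-name scan with endswith+dot-count wildcard checks by building one set of lowered names and answering with two membership queries: the host itself, and '*.' + the host with its first label stripped.
import Mathlib
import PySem

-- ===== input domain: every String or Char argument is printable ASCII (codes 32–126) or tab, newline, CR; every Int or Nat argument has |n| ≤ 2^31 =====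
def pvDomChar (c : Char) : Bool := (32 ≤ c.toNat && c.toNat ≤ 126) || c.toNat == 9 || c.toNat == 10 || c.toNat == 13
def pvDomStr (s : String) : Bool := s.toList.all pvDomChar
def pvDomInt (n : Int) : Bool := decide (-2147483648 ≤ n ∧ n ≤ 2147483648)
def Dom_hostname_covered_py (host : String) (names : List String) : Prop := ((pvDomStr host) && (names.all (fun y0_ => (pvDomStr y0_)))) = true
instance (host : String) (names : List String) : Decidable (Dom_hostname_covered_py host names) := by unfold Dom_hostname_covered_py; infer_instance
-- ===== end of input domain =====

-- B replaces A's per-name endswith+dot-count scan by one set of lowered names queried twice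
-- (the host itself, and "*." + the host with its first label stripped); return values agree everywhere.

-- ===== PORT A =====
-- the 'for n in names' loop of A, over code-point lists; h is the already-lowered host
def hcLoopA (h : List Char) : List (List Char) → Bool
  | [] => false
  | n :: rest =>
    if n = [] then hcLoopA h rest            -- if not n: continue
    else
      let nl := PySem.Chars.lower n
      if nl = h then true                    -- if n == host: return True
      else if PySem.Chars.startswith nl ['*', '.'] then
        let tail := PySem.List.slice nl (some 2) none      -- tail = n[2:]
        if PySem.Chars.endswith h ('.' :: tail)            -- host.endswith("." + tail)
            && (PySem.Chars.count h ['.'] == PySem.Chars.count tail ['.'] + 1) then true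
        else hcLoopA h rest
      else hcLoopA h rest

def hostname_covered_py (host : String) (names : List String) : Bool :=
  hcLoopA (PySem.Chars.lower host.toList) (names.map String.toList)

-- ===== PORT B =====
def hostname_covered_py_alt (host : String) (names : List String) : Bool :=
  let h := PySem.Chars.lower host.toList                   -- host = host.lower()
  let seen : PySem.Set (List Char) :=                      -- seen = {n.lower() for n in names if n}
    PySem.Set.ofList (((names.map String.toList).filter (fun n => !n.isEmpty)).map PySem.Chars.lower)
  if PySem.Set.contains seen h then true                   -- if host in seen: return True
  else
    let dot := PySem.Chars.find h ['.']                    -- dot = host.find(".")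
    (dot != -1) && PySem.Set.contains seen ('*' :: '.' :: PySem.List.slice h (some (dot + 1)) none)

-- ===== PRECONDITION & SPEC =====
def Spec_hostname_covered_py (host : String) (names : List String) (out : Bool) : Prop := out = hostname_covered_py_alt host names
instance (host : String) (names : List String) (out : Bool) : Decidable (Spec_hostname_covered_py host names out) := by unfold Spec_hostname_covered_py; infer_instance

-- ===== CLAIM (what is proved, stated in full; the proofs are below) =====
def Claim_equal_hostname_covered_py : Prop := ∀ (host : String) (names : List String), Dom_hostname_covered_py host names → Spec_hostname_covered_py host names (hostname_covered_py host names)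

-- ===== LEMMAS AND PROOFS =====

-- Python's s.count(sub) for a one-character sub is the character count
theorem count_go_singleton (c : Char) : ∀ (s : List Char) (fuel acc : Nat), s.length ≤ fuel →
    PySem.Chars.count.go [c] fuel s acc = acc + s.count c := by
  intro s
  induction s with
  | nil => intro fuel acc _; cases fuel <;> simp [PySem.Chars.count.go]
  | cons x t ih =>
    intro fuel acc hle
    cases fuel with
    | zero => simp at hle
    | succ f =>
      simp only [List.length_cons, Nat.succ_le_succ_iff] at hle
      rw [PySem.Chars.count.go]
      by_cases hx : x = c
      · simp [hx, List.isPrefixOf, ih _ _ hle]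
        omega
      · simp [List.isPrefixOf, Ne.symm hx, hx, ih _ _ hle]

theorem count_singleton (s : List Char) (c : Char) : PySem.Chars.count s [c] = s.count c := by
  rw [PySem.Chars.count]
  simp [count_go_singleton c s s.length 0 le_rfl]

theorem singleton_prefix_iff (c : Char) (l : List Char) : [c] <+: l ↔ l[0]? = some c := by
  constructor
  · rintro ⟨t, rfl⟩; rfl
  · intro h; cases l with
    | nil => simp at h
    | cons x t => simp at h; exact ⟨t, by simp [h]⟩

-- the per-name test of A's loop body, as a single Bool (proof helper, not part of the ports)
def matchA (h n : List Char) : Bool :=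
  !n.isEmpty &&
    (PySem.Chars.lower n == h ||
      (PySem.Chars.startswith (PySem.Chars.lower n) ['*', '.'] &&
        (PySem.Chars.endswith h ('.' :: PySem.List.slice (PySem.Chars.lower n) (some 2) none)
          && (PySem.Chars.count h ['.'] ==
              PySem.Chars.count (PySem.List.slice (PySem.Chars.lower n) (some 2) none) ['.'] + 1))))

theorem hcLoopA_eq_any (h : List Char) (ns : List (List Char)) : hcLoopA h ns = ns.any (matchA h) := by
  induction ns with
  | nil => rfl
  | cons n rest ih =>
    simp only [hcLoopA, List.any_cons, matchA]
    split_ifs with h1 h2 h3 h4 <;> simp_all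

-- A's wildcard test says: h = pre ++ '.' :: tail with a dot-free pre
theorem wildA_iff (h tail : List Char) :
    (PySem.Chars.endswith h ('.' :: tail)
      && (PySem.Chars.count h ['.'] == PySem.Chars.count tail ['.'] + 1)) = true
    ↔ ∃ pre, h = pre ++ '.' :: tail ∧ '.' ∉ pre := by
  rw [Bool.and_eq_true, PySem.Chars.endswith_iff, beq_iff_eq, count_singleton, count_singleton]
  constructor
  · rintro ⟨⟨pre, rfl⟩, hc⟩
    refine ⟨pre, rfl, ?_⟩
    rw [← List.count_eq_zero (a := '.')]
    simp [List.count_append] at hc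
    omega
  · rintro ⟨pre, rfl, hpre⟩
    refine ⟨⟨pre, rfl⟩, ?_⟩
    have : pre.count '.' = 0 := List.count_eq_zero.mpr hpre
    simp [List.count_append, this]

-- B's first-label strip says exactly the same
theorem wildB_iff (h tail : List Char) :
    (PySem.Chars.find h ['.'] ≠ -1 ∧ PySem.List.slice h (some (PySem.Chars.find h ['.'] + 1)) none = tail)
    ↔ ∃ pre, h = pre ++ '.' :: tail ∧ '.' ∉ pre := by
  constructor
  · rintro ⟨hne, hsl⟩
    have h0 : 0 ≤ PySem.Chars.find h ['.'] := by
      have := PySem.Chars.neg_one_le_find h ['.']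
      omega
    obtain ⟨hpre, hmin⟩ := PySem.Chars.find_spec (s := h) (sub := ['.']) h0
    set k := (PySem.Chars.find h ['.']).toNat with hk
    have hgk : h[k]? = some '.' := by
      have := (singleton_prefix_iff '.' (h.drop k)).mp hpre
      simpa [List.getElem?_drop] using this
    obtain ⟨hklen, hgetk⟩ := List.getElem?_eq_some_iff.mp hgk
    have htail : tail = h.drop (k + 1) := by
      rw [← hsl, PySem.List.slice_from h (by omega)]
      congr 1
      omega
    refine ⟨h.take k, ?_, ?_⟩
    · conv_lhs => rw [← List.take_append_drop k h, List.drop_eq_getElem_cons hklen, hgetk]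
      rw [htail]
    · intro hmem
      obtain ⟨i, hi, hieq⟩ := List.mem_iff_getElem.mp hmem
      have hik : i < k := by simp at hi; omega
      refine hmin i hik ((singleton_prefix_iff '.' (h.drop i)).mpr ?_)
      rw [List.getElem?_drop]
      rw [List.getElem_take] at hieq
      exact List.getElem?_eq_some_iff.mpr ⟨by omega, by simpa using hieq⟩
  · rintro ⟨pre, rfl, hpre⟩
    have hinf : ['.'] <:+: pre ++ '.' :: tail := ⟨pre, tail, by simp⟩
    have h0 : 0 ≤ PySem.Chars.find (pre ++ '.' :: tail) ['.'] :=
      (PySem.Chars.find_nonneg_iff _ _).mpr hinf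
    obtain ⟨hp, hmin⟩ := PySem.Chars.find_spec (s := pre ++ '.' :: tail) (sub := ['.']) h0
    set k := (PySem.Chars.find (pre ++ '.' :: tail) ['.']).toNat with hk
    have hle : k ≤ pre.length := by
      by_contra hgt
      exact hmin pre.length (by omega) (by rw [List.drop_left]; exact ⟨tail, rfl⟩)
    have hge : ¬ k < pre.length := by
      intro hlt
      have : (pre ++ '.' :: tail)[k]? = some '.' := by
        have := (singleton_prefix_iff '.' ((pre ++ '.' :: tail).drop k)).mp hp
        simpa [List.getElem?_drop] using this
      rw [List.getElem?_append_left hlt] at this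
      obtain ⟨_, hh⟩ := List.getElem?_eq_some_iff.mp this
      exact hpre (hh ▸ List.getElem_mem _)
    have hkeq : k = pre.length := by omega
    constructor
    · omega
    · rw [PySem.List.slice_from _ (by omega)]
      have : (PySem.Chars.find (pre ++ '.' :: tail) ['.'] + 1).toNat = pre.length + 1 := by omega
      rw [this, ← List.drop_drop, List.drop_left]
      rfl

-- per-name bridge: A's loop-body test is exact-or-wildcard membership in B's form
theorem matchA_iff (h n : List Char) :
    matchA h n = true ↔ n ≠ [] ∧ (PySem.Chars.lower n = h ∨
      (PySem.Chars.find h ['.'] ≠ -1 ∧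
        PySem.Chars.lower n = '*' :: '.' :: PySem.List.slice h (some (PySem.Chars.find h ['.'] + 1)) none)) := by
  unfold matchA
  rw [Bool.and_eq_true, Bool.or_eq_true, Bool.and_eq_true]
  have hsl2 : PySem.List.slice (PySem.Chars.lower n) (some 2) none = (PySem.Chars.lower n).drop 2 := by
    rw [PySem.List.slice_from _ (by norm_num)]; rfl
  constructor
  · rintro ⟨hne, hor⟩
    refine ⟨by simpa using hne, ?_⟩
    rcases hor with heq | ⟨hsw, hcond⟩
    · exact Or.inl (by simpa using heq)
    · right
      rw [hsl2] at hcond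
      obtain ⟨hd, hslh⟩ := (wildB_iff h ((PySem.Chars.lower n).drop 2)).mpr ((wildA_iff h _).mp hcond)
      obtain ⟨t, hpre⟩ := (PySem.Chars.startswith_iff _ _).mp hsw
      refine ⟨hd, ?_⟩
      rw [hslh, ← hpre]
      rfl
  · rintro ⟨hne, hor⟩
    refine ⟨by simpa using hne, ?_⟩
    rcases hor with heq | ⟨hd, heq⟩
    · exact Or.inl (by simpa using heq)
    · right
      have hsw : PySem.Chars.startswith (PySem.Chars.lower n) ['*', '.'] = true := by
        rw [PySem.Chars.startswith_iff, heq]; exact ⟨_, rfl⟩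
      refine ⟨hsw, ?_⟩
      rw [hsl2]
      refine (wildA_iff h _).mpr ((wildB_iff h _).mp ⟨hd, ?_⟩)
      rw [heq]
      rfl

-- membership in B's set of lowered non-empty names
theorem seen_mem_iff (ns : List (List Char)) (z : List Char) :
    (PySem.Set.contains (PySem.Set.ofList ((ns.filter (fun n => !n.isEmpty)).map PySem.Chars.lower)) z) = true
    ↔ ∃ n ∈ ns, n ≠ [] ∧ PySem.Chars.lower n = z := by
  rw [PySem.Set.contains_iff, PySem.Set.mem_ofList]
  simp [List.mem_filter, List.isEmpty_eq_false_iff]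
  tauto

theorem ports_agree (host : String) (names : List String) :
    hostname_covered_py host names = hostname_covered_py_alt host names := by
  unfold hostname_covered_py hostname_covered_py_alt
  rw [Bool.eq_iff_iff, hcLoopA_eq_any, List.any_eq_true]
  simp only []
  by_cases hc : (PySem.Set.contains (PySem.Set.ofList (((names.map String.toList).filter (fun n => !n.isEmpty)).map PySem.Chars.lower)) (PySem.Chars.lower host.toList)) = true
  · simp only [hc, if_true, iff_true]
    obtain ⟨n, hn, hne, hl⟩ := (seen_mem_iff _ _).mp hc
    exact ⟨n, hn, (matchA_iff _ _).mpr ⟨hne, Or.inl hl⟩⟩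
  · rw [if_neg hc]
    rw [Bool.and_eq_true, bne_iff_ne, seen_mem_iff]
    constructor
    · rintro ⟨n, hn, hm⟩
      obtain ⟨hne, hor⟩ := (matchA_iff _ _).mp hm
      rcases hor with hl | ⟨hd, hl⟩
      · exact absurd ((seen_mem_iff _ _).mpr ⟨n, hn, hne, hl⟩) hc
      · exact ⟨hd, n, hn, hne, hl⟩
    · rintro ⟨hd, n, hn, hne, hl⟩
      exact ⟨n, hn, (matchA_iff _ _).mpr ⟨hne, Or.inr ⟨hd, hl⟩⟩⟩

-- ===== VERDICT (by name: the statement is the Claim_ definition above) =====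
theorem hostname_covered_py_spec : Claim_equal_hostname_covered_py := by
  intro host names _
  unfold Spec_hostname_covered_py
  exact ports_agree host names
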